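-- pv_equiv track=rewrite | github.com/DennisPruene/AdventOfCode2023 | Day4/day4.py | compute_card_points
-- ===== SOURCE A (Python) =====
-- def compute_card_points(winning_numbers, numbers_you_have):
--     points = 0
--     for number in numbers_you_have:
--         if number in winning_numbers:
--             if points == 0:
--                 points = 1
--             else:
--                 points *= 2
--     return points
-- ===== SOURCE B (Python) =====
-- def compute_card_points(winning_numbers, numbers_you_have):
--     matches = sum(1 for n in numbers_you_have if n in winning_numbers)
--     return 0 if matches == 0 else 2 ** (matches - 1)
-- ===== Notes on version B (the rewrite author's own statement) =====
-- stated objective: simpler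
-- what changed: Replaces the stateful incremental-doubling loop by counting the matches and returning the closed-form 2**(matches-1) (0 when no match).
import Mathlib
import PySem

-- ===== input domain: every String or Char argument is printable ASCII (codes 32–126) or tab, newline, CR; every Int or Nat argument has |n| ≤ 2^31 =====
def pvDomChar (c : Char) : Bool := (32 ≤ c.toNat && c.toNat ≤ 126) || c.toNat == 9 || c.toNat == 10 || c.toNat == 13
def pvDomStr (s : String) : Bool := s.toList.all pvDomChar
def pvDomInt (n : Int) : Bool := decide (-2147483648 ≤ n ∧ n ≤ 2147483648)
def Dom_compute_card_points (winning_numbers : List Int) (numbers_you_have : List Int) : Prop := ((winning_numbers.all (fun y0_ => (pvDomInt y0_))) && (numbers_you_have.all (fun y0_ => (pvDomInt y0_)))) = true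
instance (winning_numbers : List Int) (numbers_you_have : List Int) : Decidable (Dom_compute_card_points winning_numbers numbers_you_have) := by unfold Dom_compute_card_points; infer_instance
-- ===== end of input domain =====

-- B replaces A's incremental-doubling loop by counting matches and a closed-form power of two (objective: simpler).

-- ===== PORT A =====
def compute_card_points (winning_numbers : List Int) (numbers_you_have : List Int) : Int :=
  numbers_you_have.foldl
    (fun points number =>
      if winning_numbers.contains number then
        if points = 0 then 1 else points * 2
      else points)
    0

-- ===== PORT B =====
def compute_card_points_alt (winning_numbers : List Int) (numbers_you_have : List Int) : Int :=
  let m : Nat := numbers_you_have.countP (fun n => winning_numbers.contains n)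
  if m = 0 then 0 else (2 : Int) ^ (m - 1)

-- ===== PRECONDITION & SPEC =====
def Spec_compute_card_points (winning_numbers : List Int) (numbers_you_have : List Int) (out : Int) : Prop := out = compute_card_points_alt winning_numbers numbers_you_have
instance (winning_numbers : List Int) (numbers_you_have : List Int) (out : Int) : Decidable (Spec_compute_card_points winning_numbers numbers_you_have out) := by unfold Spec_compute_card_points; infer_instance

-- ===== CLAIM (what is proved, stated in full; the proofs are below) =====
def Claim_equal_compute_card_points : Prop := ∀ (winning_numbers : List Int) (numbers_you_have : List Int), Dom_compute_card_points winning_numbers numbers_you_have → Spec_compute_card_points winning_numbers numbers_you_have (compute_card_points winning_numbers numbers_you_have)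

-- ===== LEMMAS AND PROOFS =====

-- the closed form for k matches
def pvPow (k : Nat) : Int := if k = 0 then 0 else (2 : Int) ^ (k - 1)

theorem pvPow_succ (k : Nat) :
    (if pvPow k = 0 then 1 else pvPow k * 2) = pvPow (k + 1) := by
  unfold pvPow
  rcases k with _ | k
  · simp
  · have h : (2 : Int) ^ k ≠ 0 := by positivity
    simp [h, pow_succ]

theorem foldl_invariant (w : List Int) (l : List Int) (k : Nat) :
    l.foldl
      (fun points number =>
        if w.contains number then
          if points = 0 then 1 else points * 2
        else points)
      (pvPow k)
    = pvPow (k + l.countP (fun n => w.contains n)) := by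
  induction l generalizing k with
  | nil => simp
  | cons a t ih =>
    by_cases h : w.contains a
    · simp only [List.foldl_cons, List.countP_cons, h, if_pos, pvPow_succ]
      rw [ih (k + 1)]
      congr 1
      omega
    · simp only [List.foldl_cons, List.countP_cons, h]
      simpa using ih k

-- ===== VERDICT (by name: the statement is the Claim_ definition above) =====
theorem compute_card_points_spec : Claim_equal_compute_card_points := by
  intro w l _
  unfold Spec_compute_card_points compute_card_points compute_card_points_alt
  have := foldl_invariant w l 0
  simpa [pvPow] using this
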